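-- pv_equiv track=rewrite | github.com/tetras92/SchemasDeductifsEnAMCD | CHAPITRE5/DONNEES/m_7/GenerateInstance.py | check_int_List_1
-- ===== SOURCE A (Python) =====
-- m = 11
--
-- def check_int_List_1(int_List):
--     A_binary_encoding_list = [integer_to_bin(val_int) for val_int in int_List]
--     """significativite des m criteres"""
--     for i in range(m):
--         if all([alt[i] == '0' for alt in A_binary_encoding_list]) or all(
--                 [alt[i] == '1' for alt in A_binary_encoding_list]):
--             return False
--
--     return True
--
-- def integer_to_bin(val_int):
--     return format(val_int, "b").zfill(m)
-- ===== SOURCE B (Python) =====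
-- m = 11
--
-- def integer_to_bin(val_int):
--     return format(val_int, "b").zfill(m)
--
-- def check_int_List_1(int_List):
--     # One pass over the alternatives: track, per bit position, whether every
--     # encoding seen so far has '0' there and whether every one has '1' there.
--     all_zero = [True] * m
--     all_one = [True] * m
--     for val_int in int_List:
--         s = integer_to_bin(val_int)
--         for i in range(m):
--             if s[i] != '0':
--                 all_zero[i] = False
--             if s[i] != '1':
--                 all_one[i] = False
--     for i in range(m):
--         if all_zero[i] or all_one[i]:
--             return False
--     return True
-- ===== Notes on version B (the rewrite author's own statement) =====
-- stated objective: alternative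
-- what changed: A makes up to 2*m full scans over the list (one pair of all(...) comprehensions per bit position); B makes a single pass over the list maintaining per-position all-zero/all-one flag arrays, then checks the flags.
import Mathlib
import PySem

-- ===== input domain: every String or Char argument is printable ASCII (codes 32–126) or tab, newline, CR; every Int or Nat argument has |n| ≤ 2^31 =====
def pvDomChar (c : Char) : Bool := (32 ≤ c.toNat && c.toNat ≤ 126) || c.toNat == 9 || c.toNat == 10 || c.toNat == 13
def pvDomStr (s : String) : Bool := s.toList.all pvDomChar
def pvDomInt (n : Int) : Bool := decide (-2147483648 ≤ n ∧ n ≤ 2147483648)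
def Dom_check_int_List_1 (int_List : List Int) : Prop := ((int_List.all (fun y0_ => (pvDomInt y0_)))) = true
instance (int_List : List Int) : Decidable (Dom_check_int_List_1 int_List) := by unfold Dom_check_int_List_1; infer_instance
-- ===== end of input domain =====

-- B replaces A's per-bit-position pair of full scans by a single pass that maintains
-- per-position all-zero/all-one flag arrays (alternative decomposition, same asymptotics).

-- ===== PORT A =====
-- integer_to_bin(val_int) = format(val_int, "b").zfill(11)  (on List Char)
def integer_to_bin (val_int : Int) : List Char :=
  PySem.Chars.zfill (PySem.Int.toBinChars val_int) 11

-- the `for i in range(m)` loop with its early `return False`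
-- (alt[i] == '0' is pyGet? alt i == some '0'; exact here since every encoding has length ≥ 11)
def checkLoopA (enc : List (List Char)) : List Nat → Bool
  | [] => true
  | i :: is =>
    if (enc.all fun alt => PySem.List.pyGet? alt (i : Int) == some '0')
        || (enc.all fun alt => PySem.List.pyGet? alt (i : Int) == some '1') then false
    else checkLoopA enc is

def check_int_List_1 (int_List : List Int) : Bool :=
  let A_binary_encoding_list := int_List.map integer_to_bin
  checkLoopA A_binary_encoding_list (List.range 11)

-- ===== PORT B =====
-- one step of B's outer loop: update the two flag arrays from one encoding
-- (the indexed in-place updates `all_zero[i] = False` become a rebuild over range(m))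
def stepB (st : List Bool × List Bool) (val_int : Int) : List Bool × List Bool :=
  let s := integer_to_bin val_int
  ((List.range 11).map fun i => if s.getD i ' ' ≠ '0' then false else st.1.getD i true,
   (List.range 11).map fun i => if s.getD i ' ' ≠ '1' then false else st.2.getD i true)

def check_int_List_1_alt (int_List : List Int) : Bool :=
  let st := int_List.foldl stepB (List.replicate 11 true, List.replicate 11 true)
  (List.range 11).all fun i => !(st.1.getD i true || st.2.getD i true)

-- ===== PRECONDITION & SPEC =====
def Spec_check_int_List_1 (int_List : List Int) (out : Bool) : Prop := out = check_int_List_1_alt int_List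
instance (int_List : List Int) (out : Bool) : Decidable (Spec_check_int_List_1 int_List out) := by unfold Spec_check_int_List_1; infer_instance

-- ===== CLAIM (what is proved, stated in full; the proofs are below) =====
def Claim_equal_check_int_List_1 : Prop := ∀ (int_List : List Int), Dom_check_int_List_1 int_List → Spec_check_int_List_1 int_List (check_int_List_1 int_List)

-- ===== LEMMAS AND PROOFS =====

-- "column i of the encodings of l is all c"
def colAll (c : Char) (i : Nat) (l : List Int) : Bool :=
  l.all fun v => (integer_to_bin v).getD i ' ' == c

theorem length_integer_to_bin (v : Int) : 11 ≤ (integer_to_bin v).length := by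
  simp [integer_to_bin, PySem.Chars.length_zfill]

theorem pyGet?_encoding (v : Int) (c : Char) (i : Nat) (hi : i < 11) :
    ((PySem.List.pyGet? (integer_to_bin v) (i : Int)) == some c)
      = ((integer_to_bin v).getD i ' ' == c) := by
  have hlen : i < (integer_to_bin v).length := lt_of_lt_of_le hi (length_integer_to_bin v)
  rw [PySem.List.pyGet?_natCast, List.getElem?_eq_getElem hlen, List.getD_eq_getElem _ _ hlen]
  simp

theorem all_congr_mem {α : Type} {l : List α} {p q : α → Bool}
    (h : ∀ a ∈ l, p a = q a) : l.all p = l.all q := by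
  induction l with
  | nil => rfl
  | cons a l ih =>
    simp only [List.all_cons, h a (by simp), ih fun b hb => h b (by simp [hb])]

theorem all_enc (l : List Int) (c : Char) (i : Nat) (hi : i < 11) :
    ((l.map integer_to_bin).all fun alt => PySem.List.pyGet? alt (i : Int) == some c)
      = colAll c i l := by
  rw [List.all_map]
  exact List.all_congr rfl fun v => pyGet?_encoding v c i hi

theorem checkLoopA_all (l : List Int) (is : List Nat) (his : ∀ i ∈ is, i < 11) :
    checkLoopA (l.map integer_to_bin) is
      = is.all fun i => !(colAll '0' i l || colAll '1' i l) := by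
  induction is with
  | nil => rfl
  | cons i is ih =>
    have hi : i < 11 := his i (by simp)
    simp only [checkLoopA, all_enc l '0' i hi, all_enc l '1' i hi, List.all_cons,
      ih (fun j hj => his j (by simp [hj]))]
    by_cases h : (colAll '0' i l || colAll '1' i l) = true <;> simp [h]

theorem if_ne_eq_and (s : List Char) (i : Nat) (c : Char) (b : Bool) :
    (if s.getD i ' ' ≠ c then false else b) = (b && (s.getD i ' ' == c)) := by
  cases h : (s.getD i ' ' == c)
  · rw [if_pos (by simpa using h)]; exact (Bool.and_false b).symm
  · rw [if_neg (by simpa using h)]; exact (Bool.and_true b).symm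

theorem foldl_stepB (l : List Int) (f g : Nat → Bool) :
    l.foldl stepB ((List.range 11).map f, (List.range 11).map g)
      = ((List.range 11).map fun i => f i && colAll '0' i l,
         (List.range 11).map fun i => g i && colAll '1' i l) := by
  induction l generalizing f g with
  | nil => simp [colAll]
  | cons v l ih =>
    have hmap : ∀ (h : Nat → Bool) (c : Char),
        ((List.range 11).map fun i =>
            if (integer_to_bin v).getD i ' ' ≠ c then false
            else ((List.range 11).map h).getD i true)
          = (List.range 11).map fun i => h i && ((integer_to_bin v).getD i ' ' == c) := by
      intro h c
      refine List.map_congr_left fun i hi => ?_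
      rw [PySem.List.getD_map_range h 11 i true (List.mem_range.mp hi), if_ne_eq_and]
    show l.foldl stepB (stepB ((List.range 11).map f, (List.range 11).map g) v) = _
    rw [show stepB ((List.range 11).map f, (List.range 11).map g) v
          = ((List.range 11).map fun i => f i && ((integer_to_bin v).getD i ' ' == '0'),
             (List.range 11).map fun i => g i && ((integer_to_bin v).getD i ' ' == '1')) from
        by simp only [stepB]; exact Prod.ext (hmap f '0') (hmap g '1')]
    rw [ih]
    refine Prod.ext ?_ ?_ <;>
      · dsimp only
        refine List.map_congr_left fun i _ => ?_
        simp [colAll, Bool.and_assoc]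

theorem check_alt_eq (l : List Int) :
    check_int_List_1_alt l
      = (List.range 11).all fun i => !(colAll '0' i l || colAll '1' i l) := by
  have hrep : (List.replicate 11 true, List.replicate 11 true)
      = ((List.range 11).map (fun _ => true), (List.range 11).map (fun _ => true)) := by decide
  unfold check_int_List_1_alt
  rw [hrep, foldl_stepB]
  refine all_congr_mem fun i hi => ?_
  rw [PySem.List.getD_map_range _ 11 i true (List.mem_range.mp hi),
      PySem.List.getD_map_range _ 11 i true (List.mem_range.mp hi)]
  simp

-- ===== VERDICT (by name: the statement is the Claim_ definition above) =====
theorem check_int_List_1_spec : Claim_equal_check_int_List_1 := by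
  intro l _
  unfold Spec_check_int_List_1 check_int_List_1
  rw [checkLoopA_all l (List.range 11) (fun i hi => List.mem_range.mp hi), check_alt_eq]
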